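-- pv_equiv track=rewrite | github.com/BBBys/Krypto | Kr20Ana/häufigkeiten.py | hauf1
-- ===== SOURCE A (Python) =====
-- import logging, string
--
-- def hauf1(txt):
--     hauf = {}
--     for zeichen in string.ascii_letters:
--         hauf[zeichen] = 0
--     leer = lower = upper = digit = punkt = whitespace = False
--     for zeichen in txt:
--         if zeichen in hauf:
--             hauf[zeichen] += 1
--         else:
--             #neu, ist dann ein Sonderzeichen
--             hauf[zeichen] = 1
--         # upper/lower hier in txt testen, da in hauf schon alle Zeichen vorliegen
--         if not upper and testfor(zeichen, string.ascii_uppercase):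
--             upper = True
--         if not lower and testfor(zeichen, string.ascii_lowercase):
--             lower = True
--
--     for zeichen in hauf:
--         #die folgenden sind nicht schon vorbelegt
--         if not digit and testfor(zeichen, string.digits):
--             digit = True
--         if not punkt and testfor(zeichen, string.punctuation):
--             punkt = True
--         if not whitespace and testfor(zeichen, string.whitespace):
--             whitespace = True
--         if not leer and testfor(zeichen, " "):
--             leer = True
--
--     return len(txt), hauf, len(hauf), leer, lower, upper, digit, punkt, whitespace
--
-- def testfor(zeichen, zeichensatz):
--     return zeichen in zeichensatz
-- ===== SOURCE B (Python) =====
-- import string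
--
-- def hauf1(txt):
--     # frequency table: all ascii letters (seeded at 0) first, then the other
--     # characters of txt in first-occurrence order; counts computed in one sweep each
--     hauf = {c: sum(z == c for z in txt) for c in dict.fromkeys(string.ascii_letters + txt)}
--     chars = set(txt)
--     leer = " " in chars
--     lower = not chars.isdisjoint(string.ascii_lowercase)
--     upper = not chars.isdisjoint(string.ascii_uppercase)
--     digit = not chars.isdisjoint(string.digits)
--     punkt = not chars.isdisjoint(string.punctuation)
--     whitespace = not chars.isdisjoint(string.whitespace)
--     return len(txt), hauf, len(hauf), leer, lower, upper, digit, punkt, whitespace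
-- ===== Notes on version B (the rewrite author's own statement) =====
-- stated objective: idiomatic
-- what changed: A's three state-threading loops (dict-building count loop with inline upper/lower flag updates, plus a second flag-scanning loop over the dict keys) are replaced by a single dict comprehension over the ordered-deduplicated key list string.ascii_letters + txt with per-key counts, and by six set-membership/intersection tests on set(txt) for the flags.
import Mathlib
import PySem

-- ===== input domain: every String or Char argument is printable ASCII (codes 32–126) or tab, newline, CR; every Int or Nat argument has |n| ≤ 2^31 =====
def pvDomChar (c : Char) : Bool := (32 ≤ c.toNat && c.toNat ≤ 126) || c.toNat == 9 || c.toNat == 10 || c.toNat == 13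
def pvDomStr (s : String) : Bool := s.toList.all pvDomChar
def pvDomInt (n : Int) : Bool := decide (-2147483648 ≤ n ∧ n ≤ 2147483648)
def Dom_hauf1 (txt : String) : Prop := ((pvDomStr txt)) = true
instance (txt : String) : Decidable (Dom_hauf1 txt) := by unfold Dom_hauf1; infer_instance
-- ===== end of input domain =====

set_option maxRecDepth 4000

-- B replaces A's two flag-scanning loops and the per-character dict loop by a seeded
-- ordered-dedup key list with per-key counts and set-intersection flags (objective: idiomatic).

-- string.* constants (exact ASCII contents)
def pyLetters : List Char := "abcdefghijklmnopqrstuvwxyzABCDEFGHIJKLMNOPQRSTUVWXYZ".toList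
def pyLowerCase : List Char := "abcdefghijklmnopqrstuvwxyz".toList
def pyUpperCase : List Char := "ABCDEFGHIJKLMNOPQRSTUVWXYZ".toList
def pyDigits : List Char := "0123456789".toList
def pyPunct : List Char := "!\"#$%&'()*+,-./:;<=>?@[\\]^_`{|}~".toList
def pyWhitespace : List Char := [' ', '\t', '\n', '\r', '\x0b', '\x0c']

-- ===== PORT A =====
-- 'zeichen in zeichensatz' for a single char and a string of chars = membership
def testfor (zeichen : Char) (zeichensatz : List Char) : Bool := zeichensatz.contains zeichen

def hauf1 (txt : String) : Int × (List (String × Int)) × Int × Bool × Bool × Bool × Bool × Bool × Bool :=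
  -- hauf = {}; for zeichen in string.ascii_letters: hauf[zeichen] = 0
  let hauf0 : PySem.Dict Char Int :=
    pyLetters.foldl (fun d zeichen => d.insert zeichen 0) PySem.Dict.empty
  -- for zeichen in txt: count, and set upper/lower
  let st := txt.toList.foldl
    (fun (st : PySem.Dict Char Int × Bool × Bool) zeichen =>
      (if st.1.contains zeichen then st.1.modify zeichen 0 (· + 1) else st.1.insert zeichen 1,
       if !st.2.1 && testfor zeichen pyUpperCase then true else st.2.1,
       if !st.2.2 && testfor zeichen pyLowerCase then true else st.2.2))
    (hauf0, false, false)
  -- for zeichen in hauf: set digit/punkt/whitespace/leer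
  let fl := st.1.keys.foldl
    (fun (fl : Bool × Bool × Bool × Bool) zeichen =>
      (if !fl.1 && testfor zeichen pyDigits then true else fl.1,
       if !fl.2.1 && testfor zeichen pyPunct then true else fl.2.1,
       if !fl.2.2.1 && testfor zeichen pyWhitespace then true else fl.2.2.1,
       if !fl.2.2.2 && testfor zeichen [' '] then true else fl.2.2.2))
    (false, false, false, false)
  (PySem.Str.len txt,
   st.1.items.map (fun p => (String.mk [p.1], p.2)),
   (st.1.items.length : Int),
   fl.2.2.2, st.2.2, st.2.1, fl.1, fl.2.1, fl.2.2.1)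

-- ===== PORT B =====
def hauf1_alt (txt : String) : Int × (List (String × Int)) × Int × Bool × Bool × Bool × Bool × Bool × Bool :=
  -- {c: sum(z == c for z in txt) for c in dict.fromkeys(string.ascii_letters + txt)}
  let hauf := (PySem.List.dedup (pyLetters ++ txt.toList)).map
    (fun c => (String.mk [c], txt.toList.foldl (fun n z => n + (if z == c then (1 : Int) else 0)) 0))
  let chars := PySem.Set.ofList txt.toList
  (PySem.Str.len txt,
   hauf,
   (hauf.length : Int),
   PySem.Set.contains chars ' ',
   !(PySem.Set.isdisjoint chars pyLowerCase),
   !(PySem.Set.isdisjoint chars pyUpperCase),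
   !(PySem.Set.isdisjoint chars pyDigits),
   !(PySem.Set.isdisjoint chars pyPunct),
   !(PySem.Set.isdisjoint chars pyWhitespace))

-- ===== PRECONDITION & SPEC =====
def Spec_hauf1 (txt : String) (out : Int × (List (String × Int)) × Int × Bool × Bool × Bool × Bool × Bool × Bool) : Prop := out = hauf1_alt txt
instance (txt : String) (out : Int × (List (String × Int)) × Int × Bool × Bool × Bool × Bool × Bool × Bool) : Decidable (Spec_hauf1 txt out) := by
  unfold Spec_hauf1
  letI d1 : DecidableEq (Bool × Bool) := instDecidableEqProd
  letI d2 : DecidableEq (Bool × Bool × Bool) := instDecidableEqProd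
  letI d3 : DecidableEq (Bool × Bool × Bool × Bool) := instDecidableEqProd
  letI d4 : DecidableEq (Bool × Bool × Bool × Bool × Bool) := instDecidableEqProd
  letI d5 : DecidableEq (Bool × Bool × Bool × Bool × Bool × Bool) := instDecidableEqProd
  letI d6 : DecidableEq (Int × Bool × Bool × Bool × Bool × Bool × Bool) := instDecidableEqProd
  letI d7 : DecidableEq ((List (String × Int)) × Int × Bool × Bool × Bool × Bool × Bool × Bool) := instDecidableEqProd
  letI d8 : DecidableEq (Int × (List (String × Int)) × Int × Bool × Bool × Bool × Bool × Bool × Bool) := instDecidableEqProd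
  exact d8 out (hauf1_alt txt)

-- ===== CLAIM (what is proved, stated in full; the proofs are below) =====
def Claim_equal_hauf1 : Prop := ∀ (txt : String), Dom_hauf1 txt → Spec_hauf1 txt (hauf1 txt)

-- ===== LEMMAS AND PROOFS =====

theorem flag_step (b t : Bool) : (if !b && t then true else b) = (b || t) := by
  cases b <;> cases t <;> rfl

theorem flag_fold (l : List Char) (q1 q2 q3 q4 : Char → Bool) (b1 b2 b3 b4 : Bool) :
    l.foldl (fun fl z =>
        (if !fl.1 && q1 z then true else fl.1,
         if !fl.2.1 && q2 z then true else fl.2.1,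
         if !fl.2.2.1 && q3 z then true else fl.2.2.1,
         if !fl.2.2.2 && q4 z then true else fl.2.2.2)) (b1, b2, b3, b4)
      = (b1 || l.any q1, b2 || l.any q2, b3 || l.any q3, b4 || l.any q4) := by
  induction l generalizing b1 b2 b3 b4 with
  | nil => simp
  | cons z l ih =>
      simp only [List.foldl_cons]
      rw [ih]
      simp only [flag_step, List.any_cons]
      cases b1 <;> cases b2 <;> cases b3 <;> cases b4 <;> simp [Bool.or_assoc]

theorem step_collapse (d : PySem.Dict Char Int) (z : Char) :
    (if d.contains z then d.modify z 0 (· + 1) else d.insert z 1) = d.modify z 0 (· + 1) := by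
  by_cases h : d.contains z = true
  · simp [h]
  · simp [h, PySem.Dict.modify,
      PySem.Dict.getD_of_not_contains d (0 : Int) (by simpa using h)]

theorem main_fold (l : List Char) (d : PySem.Dict Char Int) (u lo : Bool) :
    l.foldl (fun (st : PySem.Dict Char Int × Bool × Bool) zeichen =>
        (if st.1.contains zeichen then st.1.modify zeichen 0 (· + 1) else st.1.insert zeichen 1,
         if !st.2.1 && testfor zeichen pyUpperCase then true else st.2.1,
         if !st.2.2 && testfor zeichen pyLowerCase then true else st.2.2)) (d, u, lo)
      = (l.foldl (fun d x => d.modify x 0 (· + 1)) d,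
         u || l.any (fun z => testfor z pyUpperCase),
         lo || l.any (fun z => testfor z pyLowerCase)) := by
  induction l generalizing d u lo with
  | nil => simp
  | cons z l ih =>
      simp only [List.foldl_cons]
      rw [ih]
      simp only [step_collapse, flag_step, List.any_cons]
      cases u <;> cases lo <;> simp [Bool.or_assoc]

theorem letters_nodup : pyLetters.Nodup := by decide

theorem d0_items :
    (pyLetters.foldl (fun d zeichen => d.insert zeichen (0 : Int)) PySem.Dict.empty).items
      = pyLetters.map (fun c => (c, (0 : Int))) := by
  have h := PySem.Dict.items_foldl_insert_fresh (l := pyLetters) (k := id)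
    (v := fun _ => (0 : Int)) (d := PySem.Dict.empty)
    (by intro a _; simp) (by simpa using letters_nodup)
  simpa using h

theorem d0_keys :
    (pyLetters.foldl (fun d zeichen => d.insert zeichen (0 : Int)) PySem.Dict.empty).keys
      = pyLetters := by
  simp [PySem.Dict.keys, d0_items, Function.comp_def]

theorem d0_getD (k : Char) :
    (pyLetters.foldl (fun d zeichen => d.insert zeichen (0 : Int)) PySem.Dict.empty).getD k 0
      = 0 := by
  rcases h : (pyLetters.foldl (fun d zeichen => d.insert zeichen (0 : Int)) PySem.Dict.empty).get? k with _ | v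
  · exact PySem.Dict.getD_of_get?_eq_none _ _ h
  · have hv := PySem.Dict.mem_items_of_get?_eq_some _ h
    rw [d0_items] at hv
    simp only [List.mem_map] at hv
    obtain ⟨c, _, hc⟩ := hv
    injection hc with h1 h2
    rw [PySem.Dict.getD_of_get?_eq_some _ _ h, ← h2]

theorem sum_count (l : List Char) (c : Char) (n : Int) :
    l.foldl (fun n z => n + (if z == c then (1 : Int) else 0)) n = n + l.count c := by
  induction l generalizing n with
  | nil => simp
  | cons z l ih =>
      rw [List.foldl_cons, ih, List.count_cons]
      by_cases h : z = c <;> simp [h] <;> push_cast <;> omega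

theorem any_ofList (l : List Char) (q : Char → Bool) :
    (PySem.Set.ofList l).any q = l.any q := by
  rw [Bool.eq_iff_iff]
  simp [List.any_eq_true, PySem.Set.mem_ofList]

theorem any_filter_eq (l : List Char) (p q : Char → Bool) (h : ∀ c, q c = true → p c = true) :
    ((l.filter p).any q) = l.any q := by
  rw [Bool.eq_iff_iff]
  simp only [List.any_eq_true, List.mem_filter]
  constructor
  · rintro ⟨x, ⟨hx, _⟩, hq⟩; exact ⟨x, hx, hq⟩
  · rintro ⟨x, hx, hq⟩; exact ⟨x, ⟨hx, h x hq⟩, hq⟩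

theorem not_disjoint_any (l cs : List Char) :
    (!(PySem.Set.isdisjoint (PySem.Set.ofList l) cs)) = l.any (fun z => testfor z cs) := by
  rw [Bool.eq_iff_iff, Bool.not_eq_true', Bool.eq_false_iff, Ne, PySem.Set.isdisjoint_iff]
  push_neg
  simp [PySem.Set.mem_ofList, testfor, List.any_eq_true]

theorem all_not_letters (cls : List Char)
    (h : cls.all (fun c => !(pyLetters.contains c)) = true) :
    ∀ c ∈ cls, c ∉ pyLetters := by
  intro c hc
  simpa using List.all_eq_true.mp h c hc

theorem digits_not_letters : ∀ c ∈ pyDigits, c ∉ pyLetters :=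
  all_not_letters _ (by decide)
theorem punct_not_letters : ∀ c ∈ pyPunct, c ∉ pyLetters :=
  all_not_letters _ (by decide)
theorem ws_not_letters : ∀ c ∈ pyWhitespace, c ∉ pyLetters :=
  all_not_letters _ (by decide)

theorem space_class_not_letters : ∀ c ∈ [' '], c ∉ pyLetters :=
  all_not_letters _ (by decide)

theorem final_keys (l : List Char) :
    (l.foldl (fun d x => d.modify x 0 (· + 1))
        (pyLetters.foldl (fun d zeichen => d.insert zeichen (0 : Int)) PySem.Dict.empty)).keys
      = PySem.Set.update pyLetters l := by
  have h := PySem.Dict.keys_foldl_modify l (0 : Int) (fun _ _ v => v + 1)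
    (pyLetters.foldl (fun d zeichen => d.insert zeichen (0 : Int)) PySem.Dict.empty)
  rw [d0_keys] at h
  exact h

theorem final_nodup (l : List Char) :
    (l.foldl (fun d x => d.modify x 0 (· + 1))
        (pyLetters.foldl (fun d zeichen => d.insert zeichen (0 : Int)) PySem.Dict.empty)).keys.Nodup := by
  rw [final_keys]
  exact PySem.Set.nodup_update _ _ letters_nodup

theorem final_getD (l : List Char) (k : Char) :
    (l.foldl (fun d x => d.modify x 0 (· + 1))
        (pyLetters.foldl (fun d zeichen => d.insert zeichen (0 : Int)) PySem.Dict.empty)).getD k 0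
      = l.count k := by
  rw [PySem.Dict.getD_foldl_modify_add_one, d0_getD]
  simp

theorem final_items (l : List Char) :
    (l.foldl (fun d x => d.modify x 0 (· + 1))
        (pyLetters.foldl (fun d zeichen => d.insert zeichen (0 : Int)) PySem.Dict.empty)).items
      = (PySem.Set.update pyLetters l).map (fun k => (k, (l.count k : Int))) := by
  rw [PySem.Dict.items_eq_map_keys _ (final_nodup l) 0]
  simp only [final_getD, final_keys]

theorem bkeys (l : List Char) :
    PySem.List.dedup (pyLetters ++ l) = PySem.Set.update pyLetters l := by
  rw [PySem.List.dedup_eq_ofList, PySem.Set.ofList_append,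
    PySem.Set.ofList_eq_self_of_nodup _ letters_nodup]

theorem keys_any_eq (cls l : List Char) (hcls : ∀ c ∈ cls, c ∉ pyLetters) :
    (PySem.Set.update pyLetters l).any (fun z => testfor z cls)
      = l.any (fun z => testfor z cls) := by
  rw [PySem.Set.update_eq_append_filter, List.any_append]
  have h1 : pyLetters.any (fun z => testfor z cls) = false := by
    rw [List.any_eq_false]
    intro x hx
    have hxc : x ∉ cls := fun hxc => hcls x hxc hx
    simpa [testfor] using hxc
  have h2 : ∀ c, (fun z => testfor z cls) c = true →
      (fun y => !(PySem.Set.contains pyLetters y)) c = true := by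
    intro c hq
    have hc : c ∈ cls := by simpa [testfor] using hq
    have hnl : c ∉ pyLetters := hcls c hc
    simpa [PySem.Set.contains] using hnl
  rw [h1, any_filter_eq _ _ _ h2, any_ofList]
  simp

theorem leer_eq (l : List Char) :
    l.any (fun z => testfor z [' ']) = PySem.Set.contains (PySem.Set.ofList l) ' ' := by
  rw [Bool.eq_iff_iff]
  simp [testfor, List.any_eq_true, PySem.Set.mem_ofList, PySem.Set.contains_iff]

-- ===== VERDICT (by name: the statement is the Claim_ definition above) =====
theorem hauf1_spec : Claim_equal_hauf1 := by
  intro txt _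
  unfold Spec_hauf1
  simp only [hauf1, hauf1_alt]
  rw [main_fold, flag_fold]
  simp only [Prod.mk.injEq, Bool.false_or]
  refine ⟨trivial, ?_, ?_, ?_, ?_, ?_, ?_, ?_, ?_⟩
  · -- frequency table
    rw [final_items, bkeys, List.map_map]
    refine List.map_congr_left (fun c _ => ?_)
    simp only [Function.comp]
    rw [sum_count]
    simp
  · -- its length
    rw [final_items, bkeys]
    simp
  · -- leer
    rw [final_keys, keys_any_eq _ _ space_class_not_letters, leer_eq]
  · -- lower
    rw [← not_disjoint_any]
  · -- upper
    rw [← not_disjoint_any]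
  · -- digit
    rw [final_keys, keys_any_eq _ _ digits_not_letters, ← not_disjoint_any]
  · -- punkt
    rw [final_keys, keys_any_eq _ _ punct_not_letters, ← not_disjoint_any]
  · -- whitespace
    rw [final_keys, keys_any_eq _ _ ws_not_letters, ← not_disjoint_any]
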